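-- pv_equiv track=rewrite | github.com/MateoGonzalezPautaso/fiuba-computer-engineering | TB021-fundamentos-de-programacion/guia_ejercicios/python/ej_15_10.py | _tiene_mas_letra_a
-- ===== SOURCE A (Python) =====
-- def _tiene_mas_letra_a(cadena, cant_a, cant_b):
--     if len(cadena) == 0:
--         return cant_a > cant_b
--     elif cadena[0].lower() == "a":
--         cant_a += 1
--     elif cadena[0].lower() == "e":
--         cant_b += 1
--
--     return _tiene_mas_letra_a(cadena[1:], cant_a, cant_b)
-- ===== SOURCE B (Python) =====
-- def _tiene_mas_letra_a(cadena, cant_a, cant_b):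
--     a = 0
--     e = 0
--     for ch in cadena.lower():
--         if ch == 'a':
--             a += 1
--         elif ch == 'e':
--             e += 1
--     return cant_a + a > cant_b + e
-- ===== Notes on version B (the rewrite author's own statement) =====
-- stated objective: faster
-- what changed: replaced A's recursion that re-slices the string at every step with a single linear loop over the lowered string counting 'a's and 'e's, then one final comparison
import Mathlib
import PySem

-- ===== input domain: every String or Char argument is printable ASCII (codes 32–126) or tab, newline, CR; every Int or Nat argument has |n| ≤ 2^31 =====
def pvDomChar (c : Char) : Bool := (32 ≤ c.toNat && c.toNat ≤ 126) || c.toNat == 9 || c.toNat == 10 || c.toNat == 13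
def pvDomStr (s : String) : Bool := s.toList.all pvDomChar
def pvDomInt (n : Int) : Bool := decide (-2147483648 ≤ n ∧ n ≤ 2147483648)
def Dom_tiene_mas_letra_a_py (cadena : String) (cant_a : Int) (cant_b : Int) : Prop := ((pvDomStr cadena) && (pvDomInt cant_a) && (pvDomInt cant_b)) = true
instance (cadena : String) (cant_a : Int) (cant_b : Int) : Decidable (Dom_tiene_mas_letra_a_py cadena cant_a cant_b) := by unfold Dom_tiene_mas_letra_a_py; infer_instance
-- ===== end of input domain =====

-- B replaces A's recursive re-slicing with one linear pass counting 'a's and 'e's (faster: O(n) vs O(n^2)).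

-- ===== PORT A =====
-- recursion over the characters; cadena[0].lower() is lowerChar on the head, cadena[1:] is the tail
def tieneMasA_rec : List Char → Int → Int → Bool
  | [], cant_a, cant_b => decide (cant_a > cant_b)
  | c :: rest, cant_a, cant_b =>
    if PySem.Chars.lowerChar c == 'a' then tieneMasA_rec rest (cant_a + 1) cant_b
    else if PySem.Chars.lowerChar c == 'e' then tieneMasA_rec rest cant_a (cant_b + 1)
    else tieneMasA_rec rest cant_a cant_b

def tiene_mas_letra_a_py (cadena : String) (cant_a : Int) (cant_b : Int) : Bool :=
  tieneMasA_rec cadena.toList cant_a cant_b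

-- ===== PORT B =====
-- one fold over the lowered string maintaining the two counters, then a single comparison
def tieneMasA_step (ae : Int × Int) (ch : Char) : Int × Int :=
  if ch == 'a' then (ae.1 + 1, ae.2)
  else if ch == 'e' then (ae.1, ae.2 + 1)
  else ae

def tiene_mas_letra_a_py_alt (cadena : String) (cant_a : Int) (cant_b : Int) : Bool :=
  let p := (PySem.Str.lower cadena).toList.foldl tieneMasA_step (0, 0)
  decide (cant_a + p.1 > cant_b + p.2)

-- ===== PRECONDITION & SPEC =====
def Spec_tiene_mas_letra_a_py (cadena : String) (cant_a : Int) (cant_b : Int) (out : Bool) : Prop := out = tiene_mas_letra_a_py_alt cadena cant_a cant_b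
instance (cadena : String) (cant_a : Int) (cant_b : Int) (out : Bool) : Decidable (Spec_tiene_mas_letra_a_py cadena cant_a cant_b out) := by unfold Spec_tiene_mas_letra_a_py; infer_instance

-- ===== CLAIM (what is proved, stated in full; the proofs are below) =====
def Claim_equal_tiene_mas_letra_a_py : Prop := ∀ (cadena : String) (cant_a : Int) (cant_b : Int), Dom_tiene_mas_letra_a_py cadena cant_a cant_b → Spec_tiene_mas_letra_a_py cadena cant_a cant_b (tiene_mas_letra_a_py cadena cant_a cant_b)

-- ===== LEMMAS AND PROOFS =====

theorem foldl_step_eq (l : List Char) (x y : Int) :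
    l.foldl tieneMasA_step (x, y) = (x + (l.count 'a' : Int), y + (l.count 'e' : Int)) := by
  induction l generalizing x y with
  | nil => simp
  | cons c rest ih =>
    simp only [List.foldl_cons, tieneMasA_step, List.count_cons]
    split_ifs with h1 h2 <;> rw [ih] <;> simp_all [Prod.ext_iff] <;> omega

theorem tieneMasA_rec_eq (l : List Char) (a b : Int) :
    tieneMasA_rec l a b
      = decide (a + ((l.map PySem.Chars.lowerChar).count 'a' : Int)
                  > b + ((l.map PySem.Chars.lowerChar).count 'e' : Int)) := by
  induction l generalizing a b with
  | nil => simp [tieneMasA_rec]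
  | cons c rest ih =>
    simp only [tieneMasA_rec, List.map_cons, List.count_cons]
    split_ifs with h1 h2 <;> rw [ih] <;> simp_all [decide_eq_decide] <;> omega

-- ===== VERDICT (by name: the statement is the Claim_ definition above) =====
theorem tiene_mas_letra_a_py_spec : Claim_equal_tiene_mas_letra_a_py := by
  intro cadena cant_a cant_b _
  unfold Spec_tiene_mas_letra_a_py tiene_mas_letra_a_py tiene_mas_letra_a_py_alt
  rw [tieneMasA_rec_eq]
  simp [PySem.Str.toList_lower, PySem.Chars.lower, foldl_step_eq]
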